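-- pv_equiv track=rewrite | github.com/AltairRicano/ADO | extract_routes.py | find_terminal_id
-- ===== SOURCE A (Python) =====
-- def find_terminal_id(name, terminal_map):
--     """
--     Tries to find a terminal ID by name.
--     1. Exact match.
--     2. Case-insensitive match.
--     3. Substring match (if map key contains name).
--     """
--     if not name:
--         return None
--
--     # 1. Exact match
--     if name in terminal_map:
--         return terminal_map[name]
--
--     name_lower = name.lower()
--
--     # 2. Case-insensitive match
--     for k, v in terminal_map.items():
--         if k.lower() == name_lower:
--             return v
--
--     # 3. Substring match (map key contains name OR name contains map key)
--     # e.g. name="Veracruz" matches key="Veracruz CAVE"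
--     # e.g. name="México TAPO Lujo" matches key="México TAPO"
--     candidates = []
--     for k, v in terminal_map.items():
--         k_lower = k.lower()
--         if name_lower in k_lower or k_lower in name_lower:
--             candidates.append((k, v))
--
--     if candidates:
--         # Pick the one that starts with the name if possible, or the longest match?
--         # If we have "México TAPO" (shorter) matching "México TAPO Lujo" (longer name),
--         # we want to pick the key that is most similar.
--         # Let's sort by length of the key, descending, to match the most specific key possible.
--         # e.g. if we had "México" and "México TAPO", and name is "México TAPO Lujo",
--         # "México TAPO" is a better match than "México".
--         candidates.sort(key=lambda x: len(x[0]), reverse=True)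
--         return candidates[0][1]
--
--     return None
-- ===== SOURCE B (Python) =====
-- def find_terminal_id(name, terminal_map):
--     """Single-pass re-implementation: exact match fast path, then ONE loop that
--     tracks the first case-insensitive hit and the best (longest, earliest on
--     ties) substring candidate, instead of three passes plus a sort."""
--     if not name:
--         return None
--
--     if name in terminal_map:
--         return terminal_map[name]
--
--     name_lower = name.lower()
--
--     ci_hit = None          # value of the first case-insensitive key match
--     best = None            # best substring candidate (key, value)
--     for k, v in terminal_map.items():
--         k_lower = k.lower()
--         if ci_hit is None and k_lower == name_lower:
--             ci_hit = v
--         if name_lower in k_lower or k_lower in name_lower: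
--             if best is None or len(k) > len(best[0]):
--                 best = (k, v)
--
--     if ci_hit is not None:
--         return ci_hit
--     if best is not None:
--         return best[1]
--     return None
-- ===== Notes on version B (the rewrite author's own statement) =====
-- stated objective: simpler
-- what changed: Replaces A's two extra passes plus build-candidate-list-and-stable-sort-descending with a single loop that keeps the first case-insensitive hit and a running longest-key substring candidate (strict > keeps the earliest on ties).
import Mathlib
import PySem

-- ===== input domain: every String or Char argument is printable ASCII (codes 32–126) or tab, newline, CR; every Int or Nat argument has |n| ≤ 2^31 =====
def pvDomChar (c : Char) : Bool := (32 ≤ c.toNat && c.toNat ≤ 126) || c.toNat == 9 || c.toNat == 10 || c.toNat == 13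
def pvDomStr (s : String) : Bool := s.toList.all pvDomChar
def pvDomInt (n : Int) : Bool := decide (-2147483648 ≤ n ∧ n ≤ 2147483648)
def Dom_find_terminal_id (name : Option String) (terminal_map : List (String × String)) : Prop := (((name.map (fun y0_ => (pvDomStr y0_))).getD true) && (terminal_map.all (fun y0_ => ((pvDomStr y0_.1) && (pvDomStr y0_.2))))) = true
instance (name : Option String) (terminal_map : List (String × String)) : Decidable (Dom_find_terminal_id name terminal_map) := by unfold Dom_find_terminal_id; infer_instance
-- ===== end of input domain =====

-- B replaces A's two later passes and the candidate sort by a single loop keeping the first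
-- case-insensitive hit and a running longest-key substring candidate (objective: simpler).

-- ===== PORT A =====
def find_terminal_id (name : Option String) (terminal_map : List (String × String)) : Option String :=
  match name with
  | none => none                                     -- 'if not name: return None'
  | some s =>
    if s = "" then none                              -- '' is falsy too
    else
      match terminal_map.find? (fun kv => kv.1 == s) with    -- 'if name in terminal_map: return terminal_map[name]'
      | some kv => some kv.2
      | none =>
        let nl := PySem.Chars.lower s.toList         -- name_lower = name.lower()
        match terminal_map.find? (fun kv => PySem.Chars.lower kv.1.toList == nl) with  -- case-insensitive loop
        | some kv => some kv.2
        | none =>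
          let candidates := terminal_map.foldl (fun acc kv =>
            if PySem.Chars.isIn nl (PySem.Chars.lower kv.1.toList)
                || PySem.Chars.isIn (PySem.Chars.lower kv.1.toList) nl
            then acc ++ [kv] else acc) []            -- candidates.append((k, v))
          if candidates.isEmpty then none
          else
            match PySem.List.pyGet?                  -- candidates.sort(key=len, reverse=True); candidates[0][1]
                (PySem.List.sorted candidates (fun kv => PySem.Str.len kv.1) true) 0 with
            | some c => some c.2
            | none => none

-- ===== PORT B =====
def find_terminal_id_alt (name : Option String) (terminal_map : List (String × String)) : Option String :=
  match name with
  | none => none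
  | some s =>
    if s = "" then none
    else
      match terminal_map.find? (fun kv => kv.1 == s) with    -- exact-match fast path
      | some kv => some kv.2
      | none =>
        let nl := PySem.Chars.lower s.toList
        let st := terminal_map.foldl                 -- ONE loop, two accumulators (ci_hit, best)
          (fun (st : Option String × Option (String × String)) kv =>
            (if st.1.isNone && (PySem.Chars.lower kv.1.toList == nl) then some kv.2 else st.1,
             if PySem.Chars.isIn nl (PySem.Chars.lower kv.1.toList)
                 || PySem.Chars.isIn (PySem.Chars.lower kv.1.toList) nl
             then (if st.2.elim true (fun b => PySem.Str.len b.1 < PySem.Str.len kv.1)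
                   then some kv else st.2)
             else st.2)) (none, none)
        match st.1 with
        | some v => some v
        | none => st.2.map (·.2)

-- ===== PRECONDITION & SPEC =====
def Spec_find_terminal_id (name : Option String) (terminal_map : List (String × String)) (out : Option String) : Prop := out = find_terminal_id_alt name terminal_map
instance (name : Option String) (terminal_map : List (String × String)) (out : Option String) : Decidable (Spec_find_terminal_id name terminal_map out) := by unfold Spec_find_terminal_id; infer_instance

-- ===== CLAIM (what is proved, stated in full; the proofs are below) =====
def Claim_equal_find_terminal_id : Prop := ∀ (name : Option String) (terminal_map : List (String × String)), Dom_find_terminal_id name terminal_map → Spec_find_terminal_id name terminal_map (find_terminal_id name terminal_map)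

-- ===== LEMMAS AND PROOFS =====

-- B's ci_hit accumulator computes the value of the first match of p (A's early-return loop).
theorem foldl_first_hit {α β : Type} (p : α → Bool) (f : α → β) (l : List α) (init : Option β) :
    l.foldl (fun c kv => if c.isNone && p kv then some (f kv) else c) init
      = match init with | some v => some v | none => (l.find? p).map f := by
  induction l generalizing init with
  | nil => cases init <;> rfl
  | cons x t ih =>
    rw [List.foldl_cons]
    cases init with
    | some v =>
      simp only [Option.isNone_some, Bool.false_and, Bool.false_eq_true, if_false]
      exact ih (some v)
    | none =>
      by_cases hx : p x
      · simp only [Option.isNone_none, Bool.true_and, hx, if_true]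
        rw [ih (some (f x)), List.find?_cons_of_pos hx]
        rfl
      · simp only [Option.isNone_none, Bool.true_and, hx, Bool.false_eq_true, if_false]
        rw [ih none, List.find?_cons_of_neg hx]

-- Head of the (stable, descending) insertion-sort accumulator is the running strict-> max.
theorem head_foldl_insertBy {α : Type} (key : α → Int) (l : List α) (acc : List α) :
    (l.foldl (fun acc x => PySem.List.insertBy (fun a b => decide (key b < key a)) x acc) acc).head?
      = l.foldl (fun b x => if b.elim true (fun c => key c < key x) then some x else b)
          acc.head? := by
  induction l generalizing acc with
  | nil => rfl
  | cons y t ih =>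
    rw [List.foldl_cons, List.foldl_cons, ih]
    congr 1
    cases acc with
    | nil => rfl
    | cons c cs =>
      simp only [PySem.List.insertBy, List.head?_cons]
      by_cases h : key c < key y <;> simp [h]

-- Head of Python's sorted(·, key, reverse=True) is the running strict-> max (ties keep the earliest).
theorem head_sorted_rev {α : Type} (key : α → Int) (l : List α) :
    (PySem.List.sorted l key true).head?
      = l.foldl (fun b x => if b.elim true (fun c => key c < key x) then some x else b) none := by
  rw [PySem.List.sorted_rev_eq_foldl_insertBy]
  simpa using head_foldl_insertBy key l []

-- The same fact, stated with B's exact loop body (key = len of the key string).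
theorem head_sorted_rev' (l : List (String × String)) :
    (PySem.List.sorted l (fun kv => PySem.Str.len kv.1) true).head?
      = l.foldl (fun (b : Option (String × String)) kv =>
          if b.elim true (fun b => PySem.Str.len b.1 < PySem.Str.len kv.1)
          then some kv else b) none := by
  simpa using head_sorted_rev (fun kv : String × String => PySem.Str.len kv.1) l

-- ===== VERDICT (by name: the statement is the Claim_ definition above) =====
theorem find_terminal_id_spec : Claim_equal_find_terminal_id := by
  intro name tm _
  unfold Spec_find_terminal_id
  cases name with
  | none => rfl
  | some s =>
    simp only [find_terminal_id, find_terminal_id_alt]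
    by_cases hs : s = ""
    · simp [hs]
    · simp only [hs, if_false]
      cases hx : tm.find? (fun kv => kv.1 == s) with
      | some kv => rfl
      | none =>
        simp only []
        rw [PySem.List.foldl_prod_mk
          (f := fun (c : Option String) kv =>
            if c.isNone && (PySem.Chars.lower kv.1.toList == PySem.Chars.lower s.toList)
            then some kv.2 else c)
          (g := fun (b : Option (String × String)) kv =>
            if PySem.Chars.isIn (PySem.Chars.lower s.toList) (PySem.Chars.lower kv.1.toList)
                || PySem.Chars.isIn (PySem.Chars.lower kv.1.toList) (PySem.Chars.lower s.toList)
            then (if b.elim true (fun b => PySem.Str.len b.1 < PySem.Str.len kv.1)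
                  then some kv else b)
            else b)]
        rw [foldl_first_hit (f := fun kv : String × String => kv.2)]
        cases hc : tm.find? (fun kv => PySem.Chars.lower kv.1.toList == PySem.Chars.lower s.toList) with
        | some kv => rfl
        | none =>
          simp only [Option.map_none]
          rw [PySem.List.foldl_append_if_eq_filter, PySem.List.foldl_if_eq_foldl_filter,
            List.nil_append]
          cases hcn : tm.filter (fun kv =>
              PySem.Chars.isIn (PySem.Chars.lower s.toList) (PySem.Chars.lower kv.1.toList)
                || PySem.Chars.isIn (PySem.Chars.lower kv.1.toList) (PySem.Chars.lower s.toList)) with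
          | nil => rfl
          | cons c0 cs =>
            simp only [List.isEmpty_cons, Bool.false_eq_true, if_false]
            rw [PySem.List.pyGet?_zero, ← List.head?_eq_getElem?, head_sorted_rev']
            cases List.foldl (fun (b : Option (String × String)) kv =>
                if b.elim true (fun b => PySem.Str.len b.1 < PySem.Str.len kv.1)
                then some kv else b) none (c0 :: cs) with
            | none => rfl
            | some c => rfl
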